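-- pv_equiv track=rewrite | github.com/MananDhiman/Practice | python/infytq/part-2/practice-problems/level-1/problem-7.py | seed_no
-- ===== SOURCE A (Python) =====
-- def get_list_numbers(number):
--     list = []
--
--     while number > 0:
--         list.append(number % 10)
--         number //= 10
--
--     return list
--
-- def seed_no(number,ref_no):
--     # mul number by numbers digits equals ref_no
--     list = get_list_numbers(number)
--     product = number
--     for i in list:
--         product *= i
--
--     if product == ref_no:
--         return True
--
--     return False
-- ===== SOURCE B (Python) =====
-- def seed_no(number, ref_no):
--     # digits taken from the decimal string representation (no %10 / //10 arithmetic)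
--     product = number
--     if number > 0:
--         for ch in str(number):
--             product *= ord(ch) - 48
--     return product == ref_no
-- ===== Notes on version B (the rewrite author's own statement) =====
-- stated objective: alternative
-- what changed: B extracts the digits from the decimal string representation str(number) (ord(ch)-48 per character, big-endian) instead of A's arithmetic %10 // 10 loop that builds a little-endian digit list and then folds over it.
import Mathlib
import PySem

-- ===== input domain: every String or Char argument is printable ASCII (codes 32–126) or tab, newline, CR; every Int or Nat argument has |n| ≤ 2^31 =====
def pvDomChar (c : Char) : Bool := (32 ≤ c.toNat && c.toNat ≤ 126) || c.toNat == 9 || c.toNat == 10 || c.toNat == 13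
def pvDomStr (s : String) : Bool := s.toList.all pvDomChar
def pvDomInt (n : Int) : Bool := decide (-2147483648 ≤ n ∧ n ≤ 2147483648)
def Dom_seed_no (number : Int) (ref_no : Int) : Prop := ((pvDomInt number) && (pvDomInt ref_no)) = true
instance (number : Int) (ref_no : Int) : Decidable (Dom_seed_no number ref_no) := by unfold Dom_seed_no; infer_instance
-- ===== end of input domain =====

-- B reads the digits from the decimal string str(number) instead of A's %10 // 10 digit-list loop; objective: alternative.


-- ===== PORT A =====
-- get_list_numbers: while number > 0: list.append(number % 10); number //= 10
def get_list_numbers (number : Int) : List Int :=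
  if number > 0 then
    PySem.Int.mod number 10 :: get_list_numbers (PySem.Int.floordiv number 10)
  else []
termination_by number.toNat
decreasing_by
  rw [PySem.Int.floordiv_eq_ediv_of_pos (by omega : (0:Int) < 10)]
  omega

def seed_no (number : Int) (ref_no : Int) : Bool :=
  let list := get_list_numbers number
  let product := list.foldl (fun p i => p * i) number
  if product == ref_no then true else false

-- ===== PORT B =====
-- ord(ch) - 48
def dval (c : Char) : Int := (c.toNat : Int) - 48

def seed_no_alt (number : Int) (ref_no : Int) : Bool :=
  let product :=
    if number > 0 then
      (PySem.Int.toStr number).toList.foldl (fun p c => p * dval c) number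
    else number
  product == ref_no

-- ===== PRECONDITION & SPEC =====
def Spec_seed_no (number : Int) (ref_no : Int) (out : Bool) : Prop := out = seed_no_alt number ref_no
instance (number : Int) (ref_no : Int) (out : Bool) : Decidable (Spec_seed_no number ref_no out) := by unfold Spec_seed_no; infer_instance

-- ===== CLAIM (what is proved, stated in full; the proofs are below) =====
def Claim_equal_seed_no : Prop := ∀ (number : Int) (ref_no : Int), Dom_seed_no number ref_no → Spec_seed_no number ref_no (seed_no number ref_no)

-- ===== LEMMAS AND PROOFS =====

theorem dval_digitChar (d : Nat) (h : d < 10) : dval (Nat.digitChar d) = (d : Int) := by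
  interval_cases d <;> decide

theorem gln_nonpos (n : Int) (h : ¬ n > 0) : get_list_numbers n = [] := by
  rw [get_list_numbers, if_neg h]

theorem gln_natCast (m : Nat) (h : 0 < m) :
    get_list_numbers (m : Int) = ((m % 10 : Nat) : Int) :: get_list_numbers ((m / 10 : Nat) : Int) := by
  rw [get_list_numbers, if_pos (by exact_mod_cast h)]
  rw [PySem.Int.mod_eq_emod_of_pos (by omega), PySem.Int.floordiv_eq_ediv_of_pos (by omega)]
  norm_cast

theorem foldl_mul (l : List Int) (a : Int) : l.foldl (fun p i => p * i) a = a * l.prod := by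
  induction l generalizing a with
  | nil => simp
  | cons x xs ih => simp [ih, mul_assoc]

-- map dval over toDigitsCore is the reverse of A's digit list
theorem toDigitsCore_map_dval (fuel : Nat) : ∀ (n : Nat) (ds : List Char), 0 < n → n < fuel →
    (Nat.toDigitsCore 10 fuel n ds).map dval = (get_list_numbers (n : Int)).reverse ++ ds.map dval := by
  induction fuel with
  | zero => intro n ds h hlt; omega
  | succ fuel ih =>
    intro n ds h hlt
    rw [Nat.toDigitsCore]
    by_cases h10 : n / 10 = 0
    · rw [if_pos h10, gln_natCast n h, h10]
      rw [gln_nonpos ((0:Nat):Int) (by simp)]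
      simp [dval_digitChar (n % 10) (Nat.mod_lt n (by omega))]
    · rw [if_neg h10]
      have hfuel : n / 10 < fuel := by
        have : n / 10 < n := Nat.div_lt_self h (by omega)
        omega
      rw [ih (n / 10) _ (Nat.pos_of_ne_zero h10) hfuel]
      rw [gln_natCast n h]
      simp [dval_digitChar (n % 10) (Nat.mod_lt n (by omega))]

theorem toChars_map_dval (m : Nat) (h : 0 < m) :
    (PySem.Int.toChars (m : Int)).map dval = (get_list_numbers (m : Int)).reverse := by
  unfold PySem.Int.toChars
  rw [if_neg (by omega)]
  have : ((m : Int)).toNat = m := rfl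
  rw [this, Nat.toDigits, toDigitsCore_map_dval (m + 1) m [] h (by omega)]
  simp

-- ===== VERDICT (by name: the statement is the Claim_ definition above) =====
theorem seed_no_spec : Claim_equal_seed_no := by
  intro number ref_no _
  unfold Spec_seed_no seed_no seed_no_alt
  by_cases h : number > 0
  · rw [if_pos h]
    obtain ⟨m, hm⟩ : ∃ m : Nat, number = (m : Int) :=
      ⟨number.toNat, (Int.toNat_of_nonneg (le_of_lt h)).symm⟩
    have hmpos : 0 < m := by omega
    rw [PySem.Int.toList_toStr, ← List.foldl_map, hm, toChars_map_dval m hmpos,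
        foldl_mul, List.prod_reverse, ← foldl_mul]
    by_cases hp : (get_list_numbers (m : Int)).foldl (fun p i => p * i) (m : Int) = ref_no <;>
      simp [hp]
  · rw [if_neg h, gln_nonpos number h]
    by_cases hp : number = ref_no <;> simp [hp]
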